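-- pv_equiv track=rewrite | github.com/pypi-data/pypi-mirror-384 | packages/scmkl/scmkl-0.3.2.tar.gz/scmkl-0.3.2/scmkl/get_region_groupings.py | compare_regions
-- ===== SOURCE A (Python) =====
-- def _find_overlap(start1 : int, end1 : int, start2 : int, end2 : int) -> bool:
--     """
--     Function to determine whether two regions on the same chromosome
--     overlap.
--
--     Parameters
--     ----------
--     start1 : int
--         The start position for region 1
--
--     end1 : int
--         The end position for region 1
--
--     start2 : int
--         The start position for region 2
--
--     end2: int
--         The end postion for region 2
--
--     Returns
--     -------
--     is_overlapping : bool
--         `True` if the regions overlap by 1bp. `False` if the regions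
--         do not overlap
--     """
--     return max(start1, start2) <= min(end1, end2)
--
-- def compare_regions(feature_dict : dict, ga_regions : dict,
--                      peak_gene_dict : dict, gene_sets : dict, chr_sep : str
--                      ) -> dict:
--     """
--     Takes features from a single-cell data matrix and regions from
--     a gene annotation file to return an region grouping where regions
--     from feature_dict and regions from gene annotations overlap.
--
--     Parameters
--     ----------
--     feature_dict : dict
--         Keys are chromosomes and values are regions. This data should
--         come from a single-cell experiment.
--
--     ga_regions : dict
--         Keys are chromosomes and values are regions. This data should
--         come from a gene annotations (gtf) file.
--
--     peak_gene_dict : dict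
--         Keys are peaks from gene annotation file and values are the
--         gene they are associated with.
--
--     gene_sets : dict
--         Keys are gene set names and values are an iterable object of
--         gene names.
--
--     chr_sep : str
--         The character that separates the chromosome from the rest of
--         the region in the original feature array.
--
--     Returns
--     -------
--     epi_grouping : dict
--         Keys are the names from gene_sets and values are a list of
--         regions from `feature_names` that overlap with promotor regions
--         respective to genes in `gene_sets` (i.e., if region in
--         `feature_names` overlaps with promotor region from a gene in a
--         gene set from `gene_sets`, that region will be added to the new
--         dictionary under the respective gene set name).
--     """
--     epi_grouping = {group : [] for group in gene_sets.keys()}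
--
--     for chrom in feature_dict.keys():
--         if chrom not in ga_regions.keys():
--             continue
--         for region in feature_dict[chrom]:
--             for anno in ga_regions[chrom]:
--                 if _find_overlap(region[0], region[1], anno[0], anno[1]):
--                     gene = peak_gene_dict[(chrom, anno[0], anno[1])]
--                     for group in gene_sets.keys():
--                         if gene in gene_sets[group]:
--                             feat_region = ''.join((chrom, chr_sep,
--                                                   str(region[0]), "-",
--                                                   str(region[1])))
--                             epi_grouping[group].append(feat_region)
--
--     return epi_grouping
-- ===== SOURCE B (Python) =====
-- def compare_regions(feature_dict, ga_regions, peak_gene_dict, gene_sets, chr_sep):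
--     # Precompute gene -> ordered list of gene-set names containing it, so the
--     # per-overlap scan over all gene sets disappears.
--     gene_groups = {}
--     for group, genes in gene_sets.items():
--         for g in dict.fromkeys(genes):
--             gene_groups.setdefault(g, []).append(group)
--
--     epi_grouping = {group: [] for group in gene_sets}
--     for chrom, regions in feature_dict.items():
--         if chrom not in ga_regions:
--             continue
--         annos = ga_regions[chrom]
--         for region in regions:
--             for anno in annos:
--                 if max(region[0], anno[0]) <= min(region[1], anno[1]):
--                     groups = gene_groups.get(peak_gene_dict[(chrom, anno[0], anno[1])], ())
--                     if groups:
--                         label = chrom + chr_sep + str(region[0]) + "-" + str(region[1])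
--                         for grp in groups:
--                             epi_grouping[grp].append(label)
--     return epi_grouping
-- ===== Notes on version B (the rewrite author's own statement) =====
-- stated objective: alternative
-- what changed: B precomputes a gene-to-gene-set-names dictionary once from gene_sets, so the per-overlap membership scan over every gene set disappears, and builds each region label once per matched overlap instead of once per matching group.
import Mathlib
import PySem

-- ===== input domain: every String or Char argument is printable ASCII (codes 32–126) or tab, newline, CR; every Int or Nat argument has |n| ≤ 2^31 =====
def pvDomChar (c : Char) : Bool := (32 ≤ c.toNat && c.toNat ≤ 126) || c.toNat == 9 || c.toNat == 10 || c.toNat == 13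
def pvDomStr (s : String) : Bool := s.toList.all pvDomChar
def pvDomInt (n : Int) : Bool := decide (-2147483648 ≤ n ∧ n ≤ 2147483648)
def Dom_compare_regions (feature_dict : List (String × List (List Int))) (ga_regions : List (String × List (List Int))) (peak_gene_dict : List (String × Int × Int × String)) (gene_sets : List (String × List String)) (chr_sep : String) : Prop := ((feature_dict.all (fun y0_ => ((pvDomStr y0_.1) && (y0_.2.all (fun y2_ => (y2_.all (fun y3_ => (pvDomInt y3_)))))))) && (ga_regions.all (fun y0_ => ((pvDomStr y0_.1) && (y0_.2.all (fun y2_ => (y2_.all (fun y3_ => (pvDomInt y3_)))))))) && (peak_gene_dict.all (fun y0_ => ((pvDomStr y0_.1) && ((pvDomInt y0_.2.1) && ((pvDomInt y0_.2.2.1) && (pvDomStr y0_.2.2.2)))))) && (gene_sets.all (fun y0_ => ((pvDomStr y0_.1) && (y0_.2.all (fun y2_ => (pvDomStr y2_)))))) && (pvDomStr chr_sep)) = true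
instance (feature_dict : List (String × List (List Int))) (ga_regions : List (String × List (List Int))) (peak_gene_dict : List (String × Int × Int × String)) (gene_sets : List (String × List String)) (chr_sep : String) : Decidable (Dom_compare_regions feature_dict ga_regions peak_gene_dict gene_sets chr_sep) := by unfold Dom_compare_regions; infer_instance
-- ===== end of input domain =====

-- B replaces A's per-overlap scan over every gene set by a gene→groups dictionary built
-- once from gene_sets, and builds each region label once per matched overlap.

-- ===== PORT A =====
-- shared view of the dict arguments (Python receives them as dicts)
def pvPeakDict (peak_gene_dict : List (String × Int × Int × String)) : PySem.Dict (String × Int × Int) String :=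
  PySem.Dict.ofList (peak_gene_dict.map (fun q => ((q.1, q.2.1, q.2.2.1), q.2.2.2)))

def pvFindOverlap (start1 end1 start2 end2 : Int) : Bool := max start1 start2 ≤ min end1 end2

def compare_regions (feature_dict : List (String × List (List Int))) (ga_regions : List (String × List (List Int))) (peak_gene_dict : List (String × Int × Int × String)) (gene_sets : List (String × List String)) (chr_sep : String) : List (String × List String) :=
  let gaD := PySem.Dict.ofList ga_regions
  let pgD := pvPeakDict peak_gene_dict
  let gsD := PySem.Dict.ofList gene_sets
  -- epi_grouping = {group : [] for group in gene_sets.keys()}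
  let epi0 : PySem.Dict String (List String) :=
    gsD.keys.foldl (fun d group => d.insert group []) PySem.Dict.empty
  let epi := (PySem.Dict.ofList feature_dict).items.foldl (fun epi ch =>
    if gaD.contains ch.1 = false then epi        -- continue
    else ch.2.foldl (fun epi region =>
      (gaD.getD ch.1 []).foldl (fun epi anno =>
        if pvFindOverlap (PySem.List.pyGetD region 0 0) (PySem.List.pyGetD region 1 0)
                         (PySem.List.pyGetD anno 0 0) (PySem.List.pyGetD anno 1 0) then
          let gene := pgD.getD (ch.1, PySem.List.pyGetD anno 0 0, PySem.List.pyGetD anno 1 0) ""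
          gsD.keys.foldl (fun epi group =>
            if gene ∈ gsD.getD group [] then
              epi.modify group [] (fun l => l ++
                [PySem.Str.join "" [ch.1, chr_sep, PySem.Int.toStr (PySem.List.pyGetD region 0 0),
                                    "-", PySem.Int.toStr (PySem.List.pyGetD region 1 0)]])
            else epi) epi
        else epi) epi) epi) epi0
  epi.items

-- ===== PORT B =====
-- gene → ordered list of gene-set names containing it (Source B's first loop)
def pvGeneGroups (gene_sets : List (String × List String)) : PySem.Dict String (List String) :=
  (PySem.Dict.ofList gene_sets).items.foldl (fun d p =>
    (PySem.List.dedup p.2).foldl (fun d g => d.modify g [] (fun l => l ++ [p.1])) d)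
    PySem.Dict.empty

def compare_regions_alt (feature_dict : List (String × List (List Int))) (ga_regions : List (String × List (List Int))) (peak_gene_dict : List (String × Int × Int × String)) (gene_sets : List (String × List String)) (chr_sep : String) : List (String × List String) :=
  let gene_groups := pvGeneGroups gene_sets
  let pgD := pvPeakDict peak_gene_dict
  let gaD := PySem.Dict.ofList ga_regions
  let epi0 : PySem.Dict String (List String) :=
    (PySem.Dict.ofList gene_sets).keys.foldl (fun d group => d.insert group []) PySem.Dict.empty
  let epi := (PySem.Dict.ofList feature_dict).items.foldl (fun epi ch =>
    if gaD.contains ch.1 = false then epi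
    else
      let annos := gaD.getD ch.1 []
      ch.2.foldl (fun epi region =>
        annos.foldl (fun epi anno =>
          if max (PySem.List.pyGetD region 0 0) (PySem.List.pyGetD anno 0 0)
               ≤ min (PySem.List.pyGetD region 1 0) (PySem.List.pyGetD anno 1 0) then
            let groups := gene_groups.getD (pgD.getD (ch.1, PySem.List.pyGetD anno 0 0, PySem.List.pyGetD anno 1 0) "") []
            if groups = [] then epi
            else
              let label := ch.1 ++ chr_sep ++ PySem.Int.toStr (PySem.List.pyGetD region 0 0)
                           ++ "-" ++ PySem.Int.toStr (PySem.List.pyGetD region 1 0)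
              groups.foldl (fun epi grp => epi.modify grp [] (fun l => l ++ [label])) epi
          else epi) epi) epi) epi0
  epi.items

-- ===== PRECONDITION & SPEC =====
-- Pre_ excludes exactly the inputs on which the Python A raises: a region or annotation
-- list with fewer than 2 entries that the loops reach (IndexError), and an overlapping
-- annotation whose (chrom, start, end) key is missing from peak_gene_dict (KeyError).
def Pre_compare_regions (feature_dict : List (String × List (List Int))) (ga_regions : List (String × List (List Int))) (peak_gene_dict : List (String × Int × Int × String)) (gene_sets : List (String × List String)) (chr_sep : String) : Prop :=
  ∀ p ∈ (PySem.Dict.ofList feature_dict).items,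
    ∀ region ∈ p.2, ∀ anno ∈ (PySem.Dict.ofList ga_regions).getD p.1 [],
      2 ≤ region.length ∧ 2 ≤ anno.length ∧
      (max (PySem.List.pyGetD region 0 0) (PySem.List.pyGetD anno 0 0)
         ≤ min (PySem.List.pyGetD region 1 0) (PySem.List.pyGetD anno 1 0) →
        (pvPeakDict peak_gene_dict).contains (p.1, PySem.List.pyGetD anno 0 0, PySem.List.pyGetD anno 1 0) = true)
instance (feature_dict : List (String × List (List Int))) (ga_regions : List (String × List (List Int))) (peak_gene_dict : List (String × Int × Int × String)) (gene_sets : List (String × List String)) (chr_sep : String) : Decidable (Pre_compare_regions feature_dict ga_regions peak_gene_dict gene_sets chr_sep) := by unfold Pre_compare_regions; infer_instance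

def pvWitness_compare_regions : (List (String × List (List Int))) × (List (String × List (List Int))) × (List (String × Int × Int × String)) × (List (String × List String)) × String :=
  ([("1", [[1, 5]])], [("1", [[2, 3]])], [("1", 2, 3, "g")], [("s", ["g"])], ":")

def Spec_compare_regions (feature_dict : List (String × List (List Int))) (ga_regions : List (String × List (List Int))) (peak_gene_dict : List (String × Int × Int × String)) (gene_sets : List (String × List String)) (chr_sep : String) (out : List (String × List String)) : Prop := out = compare_regions_alt feature_dict ga_regions peak_gene_dict gene_sets chr_sep
instance (feature_dict : List (String × List (List Int))) (ga_regions : List (String × List (List Int))) (peak_gene_dict : List (String × Int × Int × String)) (gene_sets : List (String × List String)) (chr_sep : String) (out : List (String × List String)) : Decidable (Spec_compare_regions feature_dict ga_regions peak_gene_dict gene_sets chr_sep out) := by unfold Spec_compare_regions; infer_instance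

-- ===== CLAIM (what is proved, stated in full; the proofs are below) =====
def Claim_equal_compare_regions : Prop := ∀ (feature_dict : List (String × List (List Int))) (ga_regions : List (String × List (List Int))) (peak_gene_dict : List (String × Int × Int × String)) (gene_sets : List (String × List String)) (chr_sep : String), Dom_compare_regions feature_dict ga_regions peak_gene_dict gene_sets chr_sep → Pre_compare_regions feature_dict ga_regions peak_gene_dict gene_sets chr_sep → Spec_compare_regions feature_dict ga_regions peak_gene_dict gene_sets chr_sep (compare_regions feature_dict ga_regions peak_gene_dict gene_sets chr_sep)

-- ===== LEMMAS AND PROOFS =====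

-- building step of pvGeneGroups over one (deduplicated) gene list
theorem pv_build_inner (L : List String) (group : String) (d : PySem.Dict String (List String)) (x : String) (hnd : L.Nodup) :
    (L.foldl (fun d g => d.modify g [] (fun l => l ++ [group])) d).getD x []
      = d.getD x [] ++ (if x ∈ L then [group] else []) := by
  induction L generalizing d with
  | nil => simp
  | cons h t ih =>
    simp only [List.nodup_cons] at hnd
    simp only [List.foldl_cons, ih _ hnd.2, PySem.Dict.getD_modify]
    by_cases hx : x = h
    · subst hx
      simp [hnd.1]
    · simp [hx]

theorem pv_build_outer (items : List (String × List String)) (d : PySem.Dict String (List String)) (x : String) :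
    (items.foldl (fun d p => (PySem.List.dedup p.2).foldl (fun d g => d.modify g [] (fun l => l ++ [p.1])) d) d).getD x []
      = d.getD x [] ++ (items.filter (fun p => decide (x ∈ p.2))).map (·.1) := by
  induction items generalizing d with
  | nil => simp
  | cons p t ih =>
    simp only [List.foldl_cons, ih, pv_build_inner _ _ _ _ (PySem.List.nodup_dedup p.2),
      PySem.List.mem_dedup, List.filter_cons]
    by_cases hx : x ∈ p.2 <;> simp [hx]

theorem pv_gene_groups_getD (gene_sets : List (String × List String)) (x : String) :
    (pvGeneGroups gene_sets).getD x []
      = ((PySem.Dict.ofList gene_sets).items.filter (fun p => decide (x ∈ p.2))).map (·.1) := by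
  unfold pvGeneGroups
  rw [pv_build_outer]
  simp

theorem pv_keys_filter (d : PySem.Dict String (List String)) (hnd : d.keys.Nodup) (x : String) :
    d.keys.filter (fun g => decide (x ∈ d.getD g [])) = (d.items.filter (fun p => decide (x ∈ p.2))).map (·.1) := by
  have h1 : d.keys = d.items.map (·.1) := rfl
  rw [h1, List.filter_map]
  congr 1
  apply List.filter_congr
  intro p hp
  have hv := PySem.Dict.getD_of_mem_items d (k := p.1) (v := p.2) hp hnd []
  simp [Function.comp, hv]

-- the two per-overlap group loops agree
theorem pv_inner_eq (gene_sets : List (String × List String)) (gene feat : String) (epi : PySem.Dict String (List String)) :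
    (PySem.Dict.ofList gene_sets).keys.foldl (fun epi group =>
        if gene ∈ (PySem.Dict.ofList gene_sets).getD group [] then
          epi.modify group [] (fun l => l ++ [feat]) else epi) epi
      = (if (pvGeneGroups gene_sets).getD gene [] = [] then epi
         else ((pvGeneGroups gene_sets).getD gene []).foldl (fun epi grp => epi.modify grp [] (fun l => l ++ [feat])) epi) := by
  have hmain : (PySem.Dict.ofList gene_sets).keys.foldl (fun epi group =>
      if gene ∈ (PySem.Dict.ofList gene_sets).getD group [] then
        epi.modify group [] (fun l => l ++ [feat]) else epi) epi
      = ((pvGeneGroups gene_sets).getD gene []).foldl (fun epi grp => epi.modify grp [] (fun l => l ++ [feat])) epi := by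
    rw [pv_gene_groups_getD, ← pv_keys_filter _ (PySem.Dict.nodup_keys_ofList gene_sets) gene,
      List.foldl_filter]
    apply List.foldl_ext
    intro a g _
    by_cases h : gene ∈ (PySem.Dict.ofList gene_sets).getD g [] <;> simp [h]
  rw [hmain]
  by_cases hS : (pvGeneGroups gene_sets).getD gene [] = [] <;> simp [hS]

theorem pv_join_eq (a b c d e : String) : PySem.Str.join "" [a, b, c, d, e] = a ++ b ++ c ++ d ++ e := by
  apply String.toList_inj.mp
  simp [PySem.Str.join, PySem.Chars.join, List.intercalate]

-- ===== VERDICT (by name: the statement is the Claim_ definition above) =====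
theorem compare_regions_spec : Claim_equal_compare_regions := by
  intro feature_dict ga_regions peak_gene_dict gene_sets chr_sep _ _
  simp only [Spec_compare_regions, compare_regions, compare_regions_alt]
  congr 1
  apply List.foldl_ext
  intro epi ch _
  by_cases hc : (PySem.Dict.ofList ga_regions).contains ch.1 = false
  · rw [if_pos hc, if_pos hc]
  · rw [if_neg hc, if_neg hc]
    apply List.foldl_ext
    intro epi region _
    apply List.foldl_ext
    intro epi anno _
    by_cases hov : pvFindOverlap (PySem.List.pyGetD region 0 0) (PySem.List.pyGetD region 1 0) (PySem.List.pyGetD anno 0 0) (PySem.List.pyGetD anno 1 0) = true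
    · have hov' : max (PySem.List.pyGetD region 0 0) (PySem.List.pyGetD anno 0 0) ≤ min (PySem.List.pyGetD region 1 0) (PySem.List.pyGetD anno 1 0) := by
        simpa [pvFindOverlap] using hov
      rw [if_pos hov, if_pos hov']
      rw [pv_inner_eq]
      rw [pv_join_eq]
    · have hov' : ¬ (max (PySem.List.pyGetD region 0 0) (PySem.List.pyGetD anno 0 0) ≤ min (PySem.List.pyGetD region 1 0) (PySem.List.pyGetD anno 1 0)) := by
        simpa [pvFindOverlap] using hov
      rw [if_neg hov, if_neg hov']
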